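-- pv_equiv track=rewrite | github.com/parasiitism/AlgoDaily | leetcode/1772-sort-features-by-popularity/main.py | sortFeatures
-- ===== SOURCE A (Python) =====
-- def sortFeatures(features, responses):
--     counter = {}
--     for i in range(len(features)):
--         key = features[i]
--         counter[key] = [0, i]
--     for s in responses:
--         words = s.split(' ')
--         for w in set(words):
--             if w in counter:
--                 counter[w][0] += 1
--     freqs = []
--     for key in counter:
--         f, i = counter[key]
--         freqs.append((key, f, i))
--     freqs.sort(key=lambda x: (-x[1], x[2]))
--
--     return [key for key, f, i in freqs]
-- ===== SOURCE B (Python) =====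
-- def sortFeatures(features, responses):
--     response_sets = [set(s.split(' ')) for s in responses]
--     info = {}
--     for i, f in enumerate(features):
--         count = sum(1 for rs in response_sets if f in rs)
--         info[f] = (count, i)
--     return sorted(info, key=lambda f: (-info[f][0], info[f][1]))
-- ===== Notes on version B (the rewrite author's own statement) =====
-- stated objective: alternative
-- what changed: Inverts the traversal: instead of scanning responses and incrementing a mutable counter per word, B precomputes the word-set of each response once and, per feature, counts the response sets containing it, storing (count, index) in a dict whose overwrite keeps first-insertion order; the result is sorted(keys) by (-count, last index).
import Mathlib
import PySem

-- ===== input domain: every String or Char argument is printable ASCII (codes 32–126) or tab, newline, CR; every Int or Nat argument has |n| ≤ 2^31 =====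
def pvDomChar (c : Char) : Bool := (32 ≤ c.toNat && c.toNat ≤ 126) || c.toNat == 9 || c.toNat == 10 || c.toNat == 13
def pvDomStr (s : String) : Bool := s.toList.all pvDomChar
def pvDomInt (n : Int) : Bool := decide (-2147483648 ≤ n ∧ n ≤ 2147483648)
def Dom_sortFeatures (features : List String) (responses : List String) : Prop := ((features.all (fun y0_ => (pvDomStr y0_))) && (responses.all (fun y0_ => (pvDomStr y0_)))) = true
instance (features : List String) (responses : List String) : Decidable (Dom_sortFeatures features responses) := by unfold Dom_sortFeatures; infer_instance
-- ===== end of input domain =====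

-- B inverts A's traversal: it precomputes each response's word set and counts, per feature,
-- the response sets containing it (alternative decomposition; equivalence of the RETURN value).

-- ===== PORT A =====
def sortFeatures (features : List String) (responses : List String) : List String :=
  let counter : PySem.Dict String (Int × Int) :=
    (PySem.List.pyRange 0 features.length 1).foldl
      (fun d i => d.insert (PySem.List.pyGetD features i "") ((0 : Int), i)) PySem.Dict.empty
  let counter :=
    responses.foldl (fun d s =>
      (PySem.Set.ofList ((PySem.Str.split? s " ").getD [])).foldl
        (fun d w => if d.contains w then d.modify w ((0 : Int), (0 : Int)) (fun p => (p.1 + 1, p.2)) else d)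
        d) counter
  let freqs : List (String × Int × Int) := counter.items.map (fun p => (p.1, p.2.1, p.2.2))
  let freqs := PySem.List.sorted2 freqs (fun x => -x.2.1) (fun x => x.2.2)
  freqs.map (fun p => p.1)

-- ===== PORT B =====
def sortFeatures_alt (features : List String) (responses : List String) : List String :=
  let responseSets : List (PySem.Set String) :=
    responses.map (fun s => PySem.Set.ofList ((PySem.Str.split? s " ").getD []))
  let info : PySem.Dict String (Int × Int) :=
    (PySem.List.enumerate features).foldl
      (fun d p => d.insert p.2
        (responseSets.foldl (fun c rs => if rs.contains p.2 then c + 1 else c) (0 : Int), p.1))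
      PySem.Dict.empty
  PySem.List.sorted2 info.keys
    (fun f => -(info.getD f ((0 : Int), (0 : Int))).1)
    (fun f => (info.getD f ((0 : Int), (0 : Int))).2)

-- ===== PRECONDITION & SPEC =====
def Spec_sortFeatures (features : List String) (responses : List String) (out : List String) : Prop := out = sortFeatures_alt features responses
instance (features : List String) (responses : List String) (out : List String) : Decidable (Spec_sortFeatures features responses out) := by unfold Spec_sortFeatures; infer_instance

-- ===== CLAIM (what is proved, stated in full; the proofs are below) =====
def Claim_equal_sortFeatures : Prop := ∀ (features : List String) (responses : List String), Dom_sortFeatures features responses → Spec_sortFeatures features responses (sortFeatures features responses)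

-- ===== LEMMAS AND PROOFS =====

-- abbreviation used throughout the proofs
def pvZ : Int × Int := (0, 0)

-- B's per-feature count over a list of word sets
def pvCnt (sets : List (PySem.Set String)) (k : String) : Int :=
  sets.foldl (fun c rs => if rs.contains k then c + 1 else c) 0

lemma pvCnt_acc (sets : List (PySem.Set String)) (k : String) (a : Int) :
    sets.foldl (fun c rs => if rs.contains k then c + 1 else c) a = a + pvCnt sets k := by
  induction sets generalizing a with
  | nil => simp [pvCnt]
  | cons rs rest ih =>
    simp only [pvCnt, List.foldl_cons] at *
    rw [ih, ih (if rs.contains k then (0:Int) + 1 else 0)]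
    split <;> ring

-- A's step 1 as a fold over enumerate
def pvDictA1 (features : List String) : PySem.Dict String (Int × Int) :=
  (PySem.List.enumerate features).foldl (fun d p => d.insert p.2 ((0 : Int), p.1)) PySem.Dict.empty

lemma pvA1_eq (features : List String) :
    (PySem.List.pyRange 0 features.length 1).foldl
      (fun d i => d.insert (PySem.List.pyGetD features i "") ((0 : Int), i)) PySem.Dict.empty
    = pvDictA1 features := by
  unfold pvDictA1
  rw [PySem.List.enumerate_eq_map_pyRange features "", List.foldl_map]
  rfl

-- B's dict
def pvDictB (features : List String) (c : String → Int) : PySem.Dict String (Int × Int) :=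
  (PySem.List.enumerate features).foldl (fun d p => d.insert p.2 (c p.2, p.1)) PySem.Dict.empty

-- relating the two insert folds
lemma pvRelFold (c : String → Int) (ps : List (Int × String)) :
    ∀ (d1 d2 : PySem.Dict String (Int × Int)),
      d1.keys = d2.keys →
      (∀ k, d1.contains k = true → d2.getD k pvZ = ((d1.getD k pvZ).1 + c k, (d1.getD k pvZ).2)) →
      (ps.foldl (fun d p => d.insert p.2 ((0 : Int), p.1)) d1).keys
        = (ps.foldl (fun d p => d.insert p.2 (c p.2, p.1)) d2).keys ∧
      (∀ k, (ps.foldl (fun d p => d.insert p.2 ((0 : Int), p.1)) d1).contains k = true →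
        (ps.foldl (fun d p => d.insert p.2 (c p.2, p.1)) d2).getD k pvZ
          = (((ps.foldl (fun d p => d.insert p.2 ((0 : Int), p.1)) d1).getD k pvZ).1 + c k,
             ((ps.foldl (fun d p => d.insert p.2 ((0 : Int), p.1)) d1).getD k pvZ).2)) := by
  induction ps with
  | nil => intro d1 d2 hk hg; exact ⟨hk, hg⟩
  | cons p ps ih =>
    intro d1 d2 hk hg
    simp only [List.foldl_cons]
    apply ih
    · have hcont : d1.contains p.2 = d2.contains p.2 := by
        rw [Bool.eq_iff_iff, PySem.Dict.contains_iff_mem_keys, PySem.Dict.contains_iff_mem_keys, hk]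
      by_cases hc : d1.contains p.2 = true
      · rw [PySem.Dict.keys_insert_of_contains _ _ hc,
            PySem.Dict.keys_insert_of_contains _ _ (hcont ▸ hc), hk]
      · rw [PySem.Dict.keys_insert_of_not_contains _ _ (by simp_all),
            PySem.Dict.keys_insert_of_not_contains _ _ (by rw [← hcont]; simp_all), hk]
    · intro k hck
      by_cases hkp : k = p.2
      · subst hkp
        rw [PySem.Dict.getD_insert, PySem.Dict.getD_insert]
        simp
      · rw [PySem.Dict.getD_insert_of_ne _ _ _ hkp, PySem.Dict.getD_insert_of_ne _ _ _ hkp]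
        apply hg
        rw [PySem.Dict.contains_insert] at hck
        simpa [hkp] using hck

-- the inner set loop of A's step 2
lemma pvInnerFold (rs : List String) (hnd : rs.Nodup) :
    ∀ (d : PySem.Dict String (Int × Int)),
      (rs.foldl (fun d w => if d.contains w then d.modify w pvZ (fun p => (p.1 + 1, p.2)) else d) d).keys = d.keys ∧
      (∀ k, (rs.foldl (fun d w => if d.contains w then d.modify w pvZ (fun p => (p.1 + 1, p.2)) else d) d).getD k pvZ
        = if k ∈ rs ∧ d.contains k = true then ((d.getD k pvZ).1 + 1, (d.getD k pvZ).2) else d.getD k pvZ) := by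
  induction rs with
  | nil => intro d; simp
  | cons w rest ih =>
    intro d
    obtain ⟨hw, hrest⟩ := List.nodup_cons.1 hnd
    set d' : PySem.Dict String (Int × Int) :=
      if d.contains w then d.modify w pvZ (fun p => (p.1 + 1, p.2)) else d with hd'
    have hkeys : d'.keys = d.keys := by
      rw [hd']
      by_cases hc : d.contains w = true
      · rw [if_pos hc, PySem.Dict.keys_modify, PySem.Dict.keys_insert_of_contains _ _ hc]
      · rw [if_neg hc]
    have hcont : ∀ k, d'.contains k = d.contains k := by
      intro k
      rw [Bool.eq_iff_iff, PySem.Dict.contains_iff_mem_keys, PySem.Dict.contains_iff_mem_keys, hkeys]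
    have hgetD : ∀ k, d'.getD k pvZ
        = if k = w ∧ d.contains w = true then ((d.getD k pvZ).1 + 1, (d.getD k pvZ).2) else d.getD k pvZ := by
      intro k
      rw [hd']
      by_cases hc : d.contains w = true
      · rw [if_pos hc, PySem.Dict.getD_modify]
        by_cases hk : k = w
        · subst hk; simp [hc]
        · simp [hk]
      · rw [if_neg hc]
        simp [hc]
    obtain ⟨ihk, ihg⟩ := ih hrest d'
    refine ⟨by rw [List.foldl_cons, ← hd', ihk, hkeys], ?_⟩
    intro k
    rw [List.foldl_cons, ← hd', ihg k, hcont k, hgetD k]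
    by_cases hk : k = w
    · subst hk
      have hkrest : k ∉ rest := hw
      by_cases hc : d.contains k = true
      · simp [hkrest, hc]
      · simp [hkrest, hc]
    · simp only [List.mem_cons]
      by_cases hr : k ∈ rest
      · simp [hk, hr]
      · simp [hk, hr]

-- the outer response loop of A's step 2
lemma pvOuterFold (sets : List (PySem.Set String)) (h : ∀ rs ∈ sets, List.Nodup rs) :
    ∀ (d : PySem.Dict String (Int × Int)),
      (sets.foldl (fun d rs =>
          rs.foldl (fun d w => if d.contains w then d.modify w pvZ (fun p => (p.1 + 1, p.2)) else d) d) d).keys = d.keys ∧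
      (∀ k, d.contains k = true →
        (sets.foldl (fun d rs =>
            rs.foldl (fun d w => if d.contains w then d.modify w pvZ (fun p => (p.1 + 1, p.2)) else d) d) d).getD k pvZ
          = ((d.getD k pvZ).1 + pvCnt sets k, (d.getD k pvZ).2)) := by
  induction sets with
  | nil => intro d; simp [pvCnt]
  | cons rs rest ih =>
    intro d
    have hnd : List.Nodup rs := h rs (by simp)
    obtain ⟨hik, hig⟩ := pvInnerFold rs hnd d
    set d' : PySem.Dict String (Int × Int) :=
      rs.foldl (fun d w => if d.contains w then d.modify w pvZ (fun p => (p.1 + 1, p.2)) else d) d with hd'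
    obtain ⟨ohk, ohg⟩ := ih (fun r hr => h r (by simp [hr])) d'
    refine ⟨by rw [List.foldl_cons, ← hd', ohk, hik], ?_⟩
    intro k hc
    have hcnt : pvCnt (rs :: rest) k = (if rs.contains k then (1:Int) else 0) + pvCnt rest k := by
      simp only [pvCnt, List.foldl_cons]
      rw [pvCnt_acc]
      split <;> simp [pvCnt]
    have hc' : d'.contains k = true := by
      rw [Bool.eq_iff_iff, PySem.Dict.contains_iff_mem_keys, hik, ← PySem.Dict.contains_iff_mem_keys]
      simp [hc]
    rw [List.foldl_cons, ← hd', ohg k hc', hig k, hcnt]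
    have hmem : k ∈ rs ↔ rs.contains k = true := by
      simp [PySem.Set.contains]
    by_cases hr : rs.contains k = true
    · rw [if_pos ⟨hmem.2 hr, hc⟩, if_pos hr]
      simp; ring
    · rw [if_neg (by rw [hmem]; tauto), if_neg hr]
      simp

-- insertion into a mapped list commutes with the map when the order predicates agree on the elements involved
lemma pvInsertBy_map {α β : Type} (g : α → β) (bA : α → α → Bool) (bB : β → β → Bool)
    (x : α) (ys : List α) (h : ∀ b ∈ ys, bB (g x) (g b) = bA x b) :
    PySem.List.insertBy bB (g x) (ys.map g) = (PySem.List.insertBy bA x ys).map g := by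
  induction ys with
  | nil => simp [PySem.List.insertBy]
  | cons y ys ih =>
    simp only [List.map_cons, PySem.List.insertBy]
    rw [h y (by simp)]
    split
    · rfl
    · simp only [List.map_cons, List.cons.injEq, true_and]
      exact ih (fun b hb => h b (by simp [hb]))

lemma pvFoldl_insertBy_map {α β : Type} (g : α → β) (bA : α → α → Bool) (bB : β → β → Bool) :
    ∀ (xs acc : List α), (∀ a ∈ xs ++ acc, ∀ b ∈ xs ++ acc, bB (g a) (g b) = bA a b) →
    (xs.map g).foldl (fun ac y => PySem.List.insertBy bB y ac) (acc.map g)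
      = (xs.foldl (fun ac y => PySem.List.insertBy bA y ac) acc).map g := by
  intro xs
  induction xs with
  | nil => intro acc _; rfl
  | cons x xs ih =>
    intro acc h
    simp only [List.map_cons, List.foldl_cons]
    rw [pvInsertBy_map g bA bB x acc (fun b hb => h x (by simp) b (by simp [hb]))]
    apply ih
    intro a ha b hb
    have hmem : ∀ z, z ∈ xs ++ PySem.List.insertBy bA x acc → z ∈ (x :: xs) ++ acc := by
      intro z hz
      rcases List.mem_append.1 hz with h1 | h2
      · simp [h1]
      · rcases (PySem.List.mem_insertBy bA x z acc).1 h2 with rfl | h3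
        · simp
        · simp [h3]
    exact h a (hmem a ha) b (hmem b hb)

lemma pvSorted2_map {α β : Type} (g : α → β) (k1A : α → Int) (k2A : α → Int)
    (k1B : β → Int) (k2B : β → Int) (xs : List α)
    (h1 : ∀ a ∈ xs, k1B (g a) = k1A a) (h2 : ∀ a ∈ xs, k2B (g a) = k2A a) :
    PySem.List.sorted2 (xs.map g) k1B k2B = (PySem.List.sorted2 xs k1A k2A).map g := by
  unfold PySem.List.sorted2
  simp only [if_neg (by decide : ¬ (false = true))]
  refine pvFoldl_insertBy_map g _ _ xs [] ?_
  intro a ha b hb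
  simp only [List.append_nil] at ha hb
  rw [h1 a ha, h1 b hb, h2 a ha, h2 b hb]

lemma pvMain (features responses : List String) :
    sortFeatures features responses = sortFeatures_alt features responses := by
  -- shared notation
  set sets : List (PySem.Set String) :=
    responses.map (fun s => PySem.Set.ofList ((PySem.Str.split? s " ").getD [])) with hsets
  set info : PySem.Dict String (Int × Int) := pvDictB features (pvCnt sets) with hinfo
  set dA1 : PySem.Dict String (Int × Int) := pvDictA1 features with hdA1
  set d2 : PySem.Dict String (Int × Int) :=
    sets.foldl (fun d rs =>
      rs.foldl (fun d w => if d.contains w then d.modify w pvZ (fun p => (p.1 + 1, p.2)) else d) d) dA1 with hd2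
  -- facts about the dicts
  have hsetsnd : ∀ rs ∈ sets, List.Nodup rs := by
    intro rs hr
    rw [hsets] at hr
    obtain ⟨s, _, rfl⟩ := List.mem_map.1 hr
    exact PySem.Set.nodup_ofList _
  have hnodA1 : dA1.keys.Nodup := by
    rw [hdA1]; unfold pvDictA1
    exact PySem.Dict.nodup_keys_foldl_insert_key (PySem.List.enumerate features)
      (fun p : Int × String => p.2) (fun _ p => ((0 : Int), p.1)) PySem.Dict.empty (by simp)
  obtain ⟨hk2, hg2⟩ := pvOuterFold sets hsetsnd dA1
  obtain ⟨hkR, hgR⟩ := pvRelFold (pvCnt sets) (PySem.List.enumerate features)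
    PySem.Dict.empty PySem.Dict.empty rfl (by intro k hk; simp [PySem.Dict.contains_empty] at hk)
  have hkR' : dA1.keys = info.keys := hkR
  have hgR' : ∀ k, dA1.contains k = true →
      info.getD k pvZ = ((dA1.getD k pvZ).1 + pvCnt sets k, (dA1.getD k pvZ).2) := hgR
  have hnod2 : d2.keys.Nodup := by rw [← hd2] at hk2; rw [hk2]; exact hnodA1
  have hnodI : info.keys.Nodup := by rw [← hkR']; exact hnodA1
  -- the two dicts coincide
  have hdicts : d2 = info := by
    apply PySem.Dict.ext
    rw [PySem.Dict.items_eq_map_keys d2 hnod2 pvZ, PySem.Dict.items_eq_map_keys info hnodI pvZ]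
    rw [← hd2] at hk2
    rw [hk2, hkR']
    apply List.map_congr_left
    intro k hkmem
    have hcA : dA1.contains k = true := by
      rw [PySem.Dict.contains_iff_mem_keys, hkR']; exact hkmem
    rw [← hd2] at hg2
    rw [hg2 k hcA, hgR' k hcA]
  -- now the sorted outputs
  have hfold : responses.foldl (fun d s =>
      (PySem.Set.ofList ((PySem.Str.split? s " ").getD [])).foldl
        (fun d w => if d.contains w then d.modify w ((0 : Int), (0 : Int)) (fun p => (p.1 + 1, p.2)) else d)
        d) (pvDictA1 features) = d2 := by
    rw [hd2, hsets]
    exact (List.foldl_map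
      (f := fun s => PySem.Set.ofList ((PySem.Str.split? s " ").getD []))
      (g := fun d rs => rs.foldl
        (fun d w => if d.contains w then d.modify w pvZ (fun p => (p.1 + 1, p.2)) else d) d)
      (l := responses) (init := pvDictA1 features)).symm
  simp only [sortFeatures, sortFeatures_alt]
  rw [pvA1_eq, hfold]
  show (PySem.List.sorted2 (d2.items.map (fun p => (p.1, p.2.1, p.2.2)))
      (fun x => -x.2.1) (fun x => x.2.2)).map (fun p => p.1)
    = PySem.List.sorted2 info.keys
        (fun f => -(info.getD f ((0 : Int), (0 : Int))).1)
        (fun f => (info.getD f ((0 : Int), (0 : Int))).2)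
  rw [hdicts]
  rw [pvSorted2_map (fun p : String × Int × Int => (p.1, p.2.1, p.2.2))
      (fun p => -p.2.1) (fun p => p.2.2) (fun x => -x.2.1) (fun x => x.2.2) info.items
      (fun a _ => rfl) (fun a _ => rfl)]
  rw [List.map_map]
  have hkeys : info.keys = info.items.map (fun p => p.1) := by
    simp only [PySem.Dict.keys]
  rw [hkeys]
  rw [pvSorted2_map (fun p : String × Int × Int => p.1)
      (fun p => -p.2.1) (fun p => p.2.2)
      (fun f => -(info.getD f ((0 : Int), (0 : Int))).1)
      (fun f => (info.getD f ((0 : Int), (0 : Int))).2) info.items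
      (fun a ha => by
        show -(info.getD a.1 ((0 : Int), (0 : Int))).1 = -a.2.1
        rw [PySem.Dict.getD_of_mem_items info
          (show (a.1, a.2) ∈ info.items by rw [Prod.mk.eta]; exact ha) hnodI])
      (fun a ha => by
        show (info.getD a.1 ((0 : Int), (0 : Int))).2 = a.2.2
        rw [PySem.Dict.getD_of_mem_items info
          (show (a.1, a.2) ∈ info.items by rw [Prod.mk.eta]; exact ha) hnodI])]
  rfl

-- ===== VERDICT (by name: the statement is the Claim_ definition above) =====
theorem sortFeatures_spec : Claim_equal_sortFeatures := by
  intro features responses _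
  exact pvMain features responses
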